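-- pv_equiv track=rewrite | github.com/zsturdevant/Williams-projects | voting.py | mostVotes
-- ===== SOURCE A (Python) =====
-- def mostVotes(votes):
--     '''Takes list as input, counts number of first place votes and returns
--     a list of those who have the highest number of votes.
--
--     >>> mostVotes(firstChoiceVotes(readBallot('data/example.csv')))
--     ['Ava']
--     >>> mostVotes(['Aamir', 'Beth', 'Chris', 'Aamir'])
--     ['Aamir']
--     >>> mostVotes(['Abe', 'Abe', 'Betsy', 'Betsy', 'Carmen', 'Dave', 'Eva', 'Frida', 'Frida'])
--     ['Abe', 'Betsy', 'Frida']
--     >>> mostVotes([])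
--     []
--     '''
--     highest = []
--     voteCount = 0
--     first = votes
--     for name in first:
--         number = first.count(name)
--         if number > voteCount:
--             highest = [name]
--             voteCount = number
--             #counts the number of votes for each name and save the name and
--             #number of votes recieved by the highest.
--         elif number == voteCount and name not in highest:
--             highest.append(name)
--             #if tied for the highest number added name to list of highest.
--     return highest
-- ===== SOURCE B (Python) =====
-- def mostVotes(votes):
--     if not votes:
--         return []
--     counts = {}
--     for name in votes:
--         counts[name] = counts.get(name, 0) + 1
--     mx = max(counts.values())
--     return [name for name in counts if counts[name] == mx]
-- ===== Notes on version B (the rewrite author's own statement) =====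
-- stated objective: faster
-- what changed: Replaces A's quadratic loop (a full votes.count scan plus running-max/reset/append control flow per element) with a single counting pass into a dict, one max over the counts, and one selection pass over the distinct names in first-appearance order.
import Mathlib
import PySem

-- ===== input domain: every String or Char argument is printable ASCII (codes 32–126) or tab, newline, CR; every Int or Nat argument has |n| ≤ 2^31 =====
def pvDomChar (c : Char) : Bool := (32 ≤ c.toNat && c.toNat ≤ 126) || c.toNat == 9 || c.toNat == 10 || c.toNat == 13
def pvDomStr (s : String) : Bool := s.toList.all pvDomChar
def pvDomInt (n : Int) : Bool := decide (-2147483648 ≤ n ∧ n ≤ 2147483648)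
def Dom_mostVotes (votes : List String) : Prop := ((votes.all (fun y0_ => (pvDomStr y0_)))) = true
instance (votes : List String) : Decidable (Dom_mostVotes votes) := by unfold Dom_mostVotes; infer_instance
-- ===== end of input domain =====

-- B replaces A's quadratic per-element votes.count rescans with one counting pass, one max, one selection pass (faster).

-- ===== PORT A =====
-- the body of A's 'for name in first' loop (first = votes; st = (highest, voteCount))
def mostVotesStep (votes : List String) (st : List String × Int) (name : String) : List String × Int :=
  let number : Int := (PySem.List.count votes name : Int)
  if number > st.2 then ([name], number)
  else if number == st.2 && !(st.1.contains name) then (st.1 ++ [name], st.2)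
  else st

def mostVotes (votes : List String) : List String :=
  (votes.foldl (mostVotesStep votes) ([], 0)).1

-- ===== PORT B =====
def mostVotes_alt (votes : List String) : List String :=
  if votes == [] then []
  else
    let counts : PySem.Dict String Int :=
      votes.foldl (fun d x => d.insert x (d.getD x 0 + 1)) PySem.Dict.empty
    match PySem.List.max? counts.values (fun v => v) with
    | none => []  -- unreachable: counts is nonempty here
    | some mx => counts.keys.filter (fun n => counts.getD n 0 == mx)

-- ===== PRECONDITION & SPEC =====
def Spec_mostVotes (votes : List String) (out : List String) : Prop := out = mostVotes_alt votes
instance (votes : List String) (out : List String) : Decidable (Spec_mostVotes votes out) := by unfold Spec_mostVotes; infer_instance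

-- ===== CLAIM (what is proved, stated in full; the proofs are below) =====
def Claim_equal_mostVotes : Prop := ∀ (votes : List String), Dom_mostVotes votes → Spec_mostVotes votes (mostVotes votes)

-- ===== LEMMAS AND PROOFS =====

-- the count of a name over the full votes list, as A's loop sees it
def mvCnt (votes : List String) (n : String) : Int := (PySem.List.count votes n : Int)

-- running maximum of counts over a processed prefix p
def mvMax (votes p : List String) : Int := p.foldl (fun a n => max a (mvCnt votes n)) 0

-- A's 'highest' after processing prefix p
def mvHigh (votes p : List String) : List String :=
  (PySem.Set.ofList p).filter (fun n => mvCnt votes n == mvMax votes p)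

theorem mvCnt_le_mvMax (votes p : List String) {n : String} (h : n ∈ p) :
    mvCnt votes n ≤ mvMax votes p :=
  (PySem.List.le_foldl_max_int p (mvCnt votes) 0).2 n h

theorem mvFoldlMax_le (votes : List String) (p : List String) :
    ∀ (a b : Int), a ≤ b → (∀ n ∈ p, mvCnt votes n ≤ b) →
      p.foldl (fun x n => max x (mvCnt votes n)) a ≤ b := by
  induction p with
  | nil => intro a b ha _; simpa using ha
  | cons x t ih =>
    intro a b ha h
    simp only [List.foldl_cons]
    exact ih _ b (max_le ha (h x (by simp))) (fun n hn => h n (by simp [hn]))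

theorem mvMax_le (votes p : List String) (b : Int) (hb : 0 ≤ b)
    (h : ∀ n ∈ p, mvCnt votes n ≤ b) : mvMax votes p ≤ b :=
  mvFoldlMax_le votes p 0 b hb h

theorem mvMax_append (votes p : List String) (x : String) :
    mvMax votes (p ++ [x]) = max (mvMax votes p) (mvCnt votes x) := by
  simp [mvMax]

theorem mvOfList_append_not_mem (p : List String) (x : String) (hxp : x ∉ p) :
    PySem.Set.ofList (p ++ [x]) = PySem.Set.ofList p ++ [x] := by
  have h : x ∉ PySem.Set.ofList p := fun h => hxp ((PySem.Set.mem_ofList _ _).1 h)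
  simp [PySem.Set.ofList, List.foldl_append]
  exact PySem.Set.add_of_not_mem h

theorem mvOfList_append_mem (p : List String) (x : String) (hxp : x ∈ p) :
    PySem.Set.ofList (p ++ [x]) = PySem.Set.ofList p := by
  have h : x ∈ PySem.Set.ofList p := (PySem.Set.mem_ofList _ _).2 hxp
  simp [PySem.Set.ofList, List.foldl_append]
  exact PySem.Set.add_of_mem h

theorem mostVotesStep_eq (votes p : List String) (x : String) :
    mostVotesStep votes (mvHigh votes p, mvMax votes p) x
      = (mvHigh votes (p ++ [x]), mvMax votes (p ++ [x])) := by
  simp only [mostVotesStep]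
  rw [show ((PySem.List.count votes x : Int)) = mvCnt votes x from rfl]
  by_cases hgt : mvCnt votes x > mvMax votes p
  · -- strictly larger count: reset
    have hxp : x ∉ p := fun h => absurd (mvCnt_le_mvMax votes p h) (not_le.mpr hgt)
    have hmax : mvMax votes (p ++ [x]) = mvCnt votes x := by
      rw [mvMax_append]; exact max_eq_right (le_of_lt hgt)
    have hnil : (PySem.Set.ofList p).filter (fun n => mvCnt votes n == mvCnt votes x) = [] := by
      rw [List.filter_eq_nil_iff]
      intro n hn
      have := mvCnt_le_mvMax votes p ((PySem.Set.mem_ofList _ _).1 hn)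
      simp only [beq_iff_eq]
      omega
    have hhigh : mvHigh votes (p ++ [x]) = [x] := by
      rw [mvHigh, mvOfList_append_not_mem p x hxp, List.filter_append, hmax]
      simp [hnil]
    rw [if_pos hgt, hhigh, hmax]
  · rw [if_neg hgt]
    by_cases hcond : mvCnt votes x = mvMax votes p ∧ x ∉ mvHigh votes p
    · -- tie and not yet recorded: append
      obtain ⟨hc, hnotin⟩ := hcond
      have hxp : x ∉ p := fun hxp =>
        hnotin (List.mem_filter.2 ⟨(PySem.Set.mem_ofList _ _).2 hxp, by simp [hc]⟩)
      have hmax : mvMax votes (p ++ [x]) = mvMax votes p := by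
        rw [mvMax_append]; omega
      have hhigh : mvHigh votes (p ++ [x]) = mvHigh votes p ++ [x] := by
        rw [mvHigh, mvOfList_append_not_mem p x hxp, List.filter_append, hmax]
        simp [mvHigh, hc]
      rw [if_pos (by simp only [Bool.and_eq_true, beq_iff_eq, Bool.not_eq_true',
            List.contains_eq_mem, decide_eq_false_iff_not]; exact ⟨hc, hnotin⟩)]
      rw [hhigh, hmax]
    · -- no change
      have hmax : mvMax votes (p ++ [x]) = mvMax votes p := by
        rw [mvMax_append]; omega
      have hhigh : mvHigh votes (p ++ [x]) = mvHigh votes p := by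
        by_cases hxp : x ∈ p
        · rw [mvHigh, mvOfList_append_mem p x hxp, hmax, mvHigh]
        · have hne : mvCnt votes x ≠ mvMax votes p := by
            intro hc
            rcases not_and_or.1 hcond with h' | h'
            · exact h' hc
            · exact hxp ((PySem.Set.mem_ofList _ _).1 (List.mem_filter.1 (not_not.1 h')).1)
          rw [mvHigh, mvOfList_append_not_mem p x hxp, List.filter_append, hmax]
          simp [mvHigh, hne]
      rw [if_neg (by
        simp only [Bool.and_eq_true, beq_iff_eq, Bool.not_eq_true',
          List.contains_eq_mem, decide_eq_false_iff_not]
        exact fun h => hcond h), hhigh, hmax]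

theorem mostVotes_loop (votes : List String) :
    ∀ (l p : List String),
      l.foldl (mostVotesStep votes) (mvHigh votes p, mvMax votes p)
        = (mvHigh votes (p ++ l), mvMax votes (p ++ l)) := by
  intro l
  induction l with
  | nil => intro p; simp
  | cons x t ih =>
    intro p
    have := ih (p ++ [x])
    simpa [mostVotesStep_eq votes p x] using this

-- characterisation of A: names of first occurrence whose count is the global maximum
theorem mostVotes_char (votes : List String) :
    mostVotes votes
      = (PySem.Set.ofList votes).filter (fun n => mvCnt votes n == mvMax votes votes) := by
  have h := mostVotes_loop votes votes []
  simp only [List.nil_append] at h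
  have h0 : (([] : List String), (0 : Int)) = (mvHigh votes [], mvMax votes []) := by
    simp [mvHigh, mvMax]
  rw [mostVotes, h0, h]
  rfl

-- folding Set.add over a nonempty accumulator keeps its head
theorem mvFoldlAdd_head (t : List String) :
    ∀ (v : String) (s : List String),
      ∃ s', t.foldl PySem.Set.add (v :: s) = v :: s' := by
  induction t with
  | nil => intro v s; exact ⟨s, rfl⟩
  | cons y u ih =>
    intro v s
    simp only [List.foldl_cons]
    by_cases hy : y ∈ (v :: s)
    · rw [PySem.Set.add_of_mem hy]; exact ih v s
    · rw [PySem.Set.add_of_not_mem hy]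
      have := ih v (s ++ [y])
      simpa using this

theorem mostVotes_spec_aux (votes : List String) : mostVotes votes = mostVotes_alt votes := by
  cases votes with
  | nil => rfl
  | cons v t =>
    rw [mostVotes_char]
    simp only [mostVotes_alt, PySem.Dict.foldl_insert_getD_add_one_eq_counter]
    rw [if_neg (by simp)]
    -- counts.values is the list of counts of the distinct names
    have hvals : (PySem.Dict.counter (v :: t)).values
        = (PySem.Set.ofList (v :: t)).map (fun k => (PySem.List.count (v :: t) k : Int)) := by
      show ((PySem.Dict.counter (v :: t)).items).map (·.2) = _
      rw [PySem.Dict.items_counter]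
      simp [Function.comp, PySem.List.count_eq]
    -- Set.ofList (v :: t) = v :: s for some s
    obtain ⟨s, hS⟩ : ∃ s, PySem.Set.ofList (v :: t) = v :: s := by
      have h0 : PySem.Set.ofList (v :: t) = t.foldl PySem.Set.add [v] := by
        simp [PySem.Set.ofList, PySem.Set.add]
      rw [h0]
      exact mvFoldlAdd_head t v []
    have hsub : ∀ n ∈ v :: s, n ∈ v :: t := fun n hn =>
      (PySem.Set.mem_ofList _ _).1 (hS ▸ hn)
    -- the maximum over the distinct counts is mvMax over the whole list
    have hfold : (s.map (fun k => (PySem.List.count (v :: t) k : Int))).foldl max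
          (mvCnt (v :: t) v)
        = s.foldl (fun a n => max a (mvCnt (v :: t) n)) (mvCnt (v :: t) v) := by
      rw [List.foldl_map]; rfl
    have hmx : (s.map (fun k => (PySem.List.count (v :: t) k : Int))).foldl max
          (mvCnt (v :: t) v) = mvMax (v :: t) (v :: t) := by
      rw [hfold]
      have hle1 : s.foldl (fun a n => max a (mvCnt (v :: t) n)) (mvCnt (v :: t) v)
          ≤ mvMax (v :: t) (v :: t) :=
        mvFoldlMax_le (v :: t) s (mvCnt (v :: t) v) (mvMax (v :: t) (v :: t))
          (mvCnt_le_mvMax (v :: t) (v :: t) (by simp))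
          (fun n hn => mvCnt_le_mvMax (v :: t) (v :: t) (hsub n (by simp [hn])))
      have hb := PySem.List.le_foldl_max_int s (mvCnt (v :: t))
        (mvCnt (v :: t) v)
      have hle2 : mvMax (v :: t) (v :: t)
          ≤ s.foldl (fun a n => max a (mvCnt (v :: t) n)) (mvCnt (v :: t) v) := by
        apply mvMax_le
        · exact le_trans (Int.natCast_nonneg _) hb.1
        · intro n hn
          have hmem : n ∈ v :: s := by
            have := (PySem.Set.mem_ofList (v :: t) n).2 hn
            rw [hS] at this
            exact this
          cases hmem with
          | head => exact hb.1
          | tail _ hns => exact hb.2 n hns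
      omega
    rw [hvals, hS, List.map_cons]
    rw [show ((PySem.List.count (v :: t) v : Int)) = mvCnt (v :: t) v from rfl]
    rw [PySem.List.max?_id_cons, hmx]
    simp only [PySem.Dict.keys_counter, PySem.Dict.getD_counter, hS]
    apply List.filter_congr
    intro n _
    simp [mvCnt, PySem.List.count_eq]

-- ===== VERDICT (by name: the statement is the Claim_ definition above) =====
theorem mostVotes_spec : Claim_equal_mostVotes := by
  intro votes _
  unfold Spec_mostVotes
  exact mostVotes_spec_aux votes
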